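-- pv_equiv track=rewrite | github.com/Valeriarm/hex-game | HexPlayer.py | num_potential_connection_spot
-- ===== SOURCE A (Python) =====
-- def check_pos(d_pos, d_size):
-- 	# check validity of pos
-- 	try:
-- 		pi = d_pos[0]
-- 		pj = d_pos[1]
-- 		if pi<0 or pi>=d_size or pj<0 or pj>=d_size:
-- 			return False
-- 		else:
-- 			return True
-- 	except Exception:
-- 		# could be type error or something
-- 		return False
--
-- def neighbours(pos, size):
--     # i is letter and j is number
--     (i, j) = pos
--     neighbour_list = []
--     possible_pos_list = [(i-1, j), (i-1, j+1), (i, j-1), (i, j+1), (i+1, j-1), (i+1, j)]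
--     for possible_pos in possible_pos_list:
--         if (check_pos(possible_pos, size)):
--             neighbour_list.append(possible_pos)
--     return neighbour_list
--
-- def num_potential_connection_spot(board, size):
--     # the average flexibility
--     score = 0
--     for i in range(size):
--         for j in range(size):
--             current_player = board[i][j]
--             if current_player != 0:
--                 neighbours_list = neighbours((i,j), size)
--                 for n in neighbours_list:
--                     if board[n[0]][n[1]] == 0:
--                         score += current_player
--     return score
-- ===== SOURCE B (Python) =====
-- def num_potential_connection_spot(board, size):
--     # edge-driven rewrite: enumerate each undirected adjacency exactly once via the
--     # three "forward" offsets and classify the pair; a mixed (occupied, empty) pair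
--     # contributes the occupied endpoint's value.
--     score = 0
--     for i in range(size):
--         for j in range(size):
--             a = board[i][j]
--             for di, dj in ((0, 1), (1, -1), (1, 0)):
--                 ni, nj = i + di, j + dj
--                 if 0 <= ni < size and 0 <= nj < size:
--                     b = board[ni][nj]
--                     if b == 0:
--                         if a != 0:
--                             score += a
--                     elif a == 0:
--                         score += b
--     return score
-- ===== Notes on version B (the rewrite author's own statement) =====
-- stated objective: alternative
-- what changed: B is edge-driven instead of vertex-driven: it enumerates each undirected adjacency exactly once via the three forward offsets and classifies the pair, adding the occupied endpoint's value of every mixed (occupied, empty) pair, whereas A builds a six-neighbour list for every occupied cell and adds that cell's own value per empty neighbour; equality rests on each mixed pair being counted once either way.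
import Mathlib
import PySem

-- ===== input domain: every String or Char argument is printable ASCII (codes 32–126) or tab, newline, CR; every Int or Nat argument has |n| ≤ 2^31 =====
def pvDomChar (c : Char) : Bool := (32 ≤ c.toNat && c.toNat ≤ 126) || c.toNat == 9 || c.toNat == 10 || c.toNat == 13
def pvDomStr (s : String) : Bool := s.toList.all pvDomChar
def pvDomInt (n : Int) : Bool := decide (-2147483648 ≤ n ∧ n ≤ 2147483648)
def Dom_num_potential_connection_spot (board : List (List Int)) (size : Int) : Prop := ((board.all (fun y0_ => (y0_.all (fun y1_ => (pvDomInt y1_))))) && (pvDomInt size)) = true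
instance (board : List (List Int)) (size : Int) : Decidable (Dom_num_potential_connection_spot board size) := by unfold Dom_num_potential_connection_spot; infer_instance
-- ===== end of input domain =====

-- B is edge-driven: each undirected adjacency is enumerated once via the three forward
-- offsets and a mixed (occupied, empty) pair contributes the occupied endpoint's value;
-- A is vertex-driven (six-neighbour list per occupied cell). Alternative decomposition, same cost.

-- board[i][j] (both programs only evaluate it at indices Pre_ keeps in range)
def pvCell (board : List (List Int)) (i j : Int) : Int :=
  PySem.List.pyGetD (PySem.List.pyGetD board i []) j 0

-- ===== PORT A =====
def check_pos (d_pos : Int × Int) (d_size : Int) : Bool :=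
  if d_pos.1 < 0 || d_pos.1 ≥ d_size || d_pos.2 < 0 || d_pos.2 ≥ d_size then false else true

def neighbours (pos : Int × Int) (size : Int) : List (Int × Int) :=
  [(pos.1 - 1, pos.2), (pos.1 - 1, pos.2 + 1), (pos.1, pos.2 - 1),
   (pos.1, pos.2 + 1), (pos.1 + 1, pos.2 - 1), (pos.1 + 1, pos.2)].foldl
    (fun acc p => if check_pos p size then acc ++ [p] else acc) []

def num_potential_connection_spot (board : List (List Int)) (size : Int) : Int :=
  (PySem.List.pyRange 0 size 1).foldl (fun score i =>
    (PySem.List.pyRange 0 size 1).foldl (fun score j =>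
      let current_player := pvCell board i j
      if current_player ≠ 0 then
        (neighbours (i, j) size).foldl (fun score n =>
          if pvCell board n.1 n.2 = 0 then score + current_player else score) score
      else score) score) 0

-- ===== PORT B =====
-- the three forward offsets: each undirected adjacent pair is reached exactly once
def pvFwd : List (Int × Int) := [(0, 1), (1, -1), (1, 0)]

def num_potential_connection_spot_alt (board : List (List Int)) (size : Int) : Int :=
  (PySem.List.pyRange 0 size 1).foldl (fun score i =>
    (PySem.List.pyRange 0 size 1).foldl (fun score j =>
      let a := pvCell board i j
      pvFwd.foldl (fun score d =>
        let ni := i + d.1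
        let nj := j + d.2
        if 0 ≤ ni ∧ ni < size ∧ 0 ≤ nj ∧ nj < size then
          let b := pvCell board ni nj
          if b = 0 then (if a ≠ 0 then score + a else score)
          else (if a = 0 then score + b else score)
        else score) score) score) 0

-- ===== PRECONDITION & SPEC =====
-- Pre_: exactly the inputs where Python A returns (it indexes board[i][j] for all 0 ≤ i,j < size).
def Pre_num_potential_connection_spot (board : List (List Int)) (size : Int) : Prop :=
  size ≤ (board.length : Int) ∧ ∀ row ∈ board.take size.toNat, size ≤ (row.length : Int)
instance (board : List (List Int)) (size : Int) : Decidable (Pre_num_potential_connection_spot board size) := by unfold Pre_num_potential_connection_spot; infer_instance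

def pvWitness_num_potential_connection_spot : List (List Int) × Int := ([[1, 0], [0, -1]], 2)

def Spec_num_potential_connection_spot (board : List (List Int)) (size : Int) (out : Int) : Prop := out = num_potential_connection_spot_alt board size
instance (board : List (List Int)) (size : Int) (out : Int) : Decidable (Spec_num_potential_connection_spot board size out) := by unfold Spec_num_potential_connection_spot; infer_instance

-- ===== CLAIM (what is proved, stated in full; the proofs are below) =====
def Claim_equal_num_potential_connection_spot : Prop := ∀ (board : List (List Int)) (size : Int), Dom_num_potential_connection_spot board size → Pre_num_potential_connection_spot board size → Spec_num_potential_connection_spot board size (num_potential_connection_spot board size)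

-- ===== LEMMAS AND PROOFS =====

-- generic loop shapes
theorem pvFoldlIfAdd {a : Type} (l : List a) (p : a → Prop) [DecidablePred p] (v : a → Int) (s : Int) :
    l.foldl (fun acc x => if p x then acc + v x else acc) s
      = s + (l.map fun x => if p x then v x else 0).sum := by
  induction l generalizing s with
  | nil => simp
  | cons h t ih => by_cases hp : p h <;> simp [hp, ih, add_assoc]

theorem pvFoldlAddF {a : Type} (f : a → Int) (step : Int → a → Int)
    (h : ∀ s x, step s x = s + f x) (l : List a) (s : Int) :
    l.foldl step s = s + (l.map f).sum := by
  induction l generalizing s with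
  | nil => simp
  | cons hd t ih => simp [h, ih, add_assoc]

theorem pvSumMapFilter {a : Type} (l : List a) (p : a → Bool) (g : a → Int) :
    ((l.filter p).map g).sum = (l.map fun x => if p x then g x else 0).sum := by
  induction l with
  | nil => simp
  | cons h t ih => by_cases hp : p h <;> simp [hp, ih]

-- all six offsets (A's neighbour order), indexed by an integer
def pvOffs : List (Int × Int) := [(-1, 0), (-1, 1), (0, -1), (0, 1), (1, -1), (1, 0)]

def offIdx (k : Int) : Int × Int := pvOffs.getD k.toNat (0, 0)

-- A's per-cell, per-offset contribution
def gA (board : List (List Int)) (size i j : Int) (d : Int × Int) : Int :=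
  if check_pos (i + d.1, j + d.2) size = true ∧
      pvCell board (i + d.1) (j + d.2) = 0 ∧ pvCell board i j ≠ 0 then
    pvCell board i j
  else 0

-- B's per-cell, per-forward-offset (edge) contribution
def gE (board : List (List Int)) (size i j : Int) (d : Int × Int) : Int :=
  if 0 ≤ i + d.1 ∧ i + d.1 < size ∧ 0 ≤ j + d.2 ∧ j + d.2 < size then
    if pvCell board (i + d.1) (j + d.2) = 0 then
      (if pvCell board i j ≠ 0 then pvCell board i j else 0)
    else (if pvCell board i j = 0 then pvCell board (i + d.1) (j + d.2) else 0)
  else 0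

-- the "empty base, occupied forward neighbour" half of an edge term
def gRev (board : List (List Int)) (size i j : Int) (d : Int × Int) : Int :=
  if (0 ≤ i + d.1 ∧ i + d.1 < size ∧ 0 ≤ j + d.2 ∧ j + d.2 < size) ∧
      pvCell board i j = 0 ∧ pvCell board (i + d.1) (j + d.2) ≠ 0 then
    pvCell board (i + d.1) (j + d.2)
  else 0

theorem pvCheckPosIff (p : Int × Int) (s : Int) :
    check_pos p s = true ↔ 0 ≤ p.1 ∧ p.1 < s ∧ 0 ≤ p.2 ∧ p.2 < s := by
  simp only [check_pos]
  split_ifs with h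
  · simp only [false_iff]
    intro hc
    simp only [Bool.or_eq_true, decide_eq_true_eq] at h
    omega
  · simp only [true_iff]
    simp only [Bool.or_eq_true, decide_eq_true_eq, not_or] at h
    omega

-- an edge term splits into A's term plus the reversed term
theorem pvEdgeSplit (board : List (List Int)) (size i j : Int) (d : Int × Int) :
    gE board size i j d = gA board size i j d + gRev board size i j d := by
  have hc := pvCheckPosIff (i + d.1, j + d.2) size
  simp only [gE, gA, gRev]
  split_ifs <;> simp_all

theorem pvNeighboursEq (i j size : Int) :
    neighbours (i, j) size
      = ((pvOffs.map fun d => (i + d.1, j + d.2)).filter fun p => check_pos p size) := by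
  unfold neighbours
  rw [PySem.List.foldl_append_if_eq_filter]
  simp [pvOffs, sub_eq_add_neg]

theorem pvACell (board : List (List Int)) (size i j : Int) :
    (if pvCell board i j ≠ 0 then
        ((neighbours (i, j) size).map fun n =>
          if pvCell board n.1 n.2 = 0 then pvCell board i j else 0).sum
      else 0)
      = (pvOffs.map (gA board size i j)).sum := by
  rw [pvNeighboursEq, pvSumMapFilter, List.map_map]
  by_cases hcp : pvCell board i j ≠ 0
  · rw [if_pos hcp]
    refine congrArg List.sum (List.map_congr_left ?_)
    intro d _
    simp only [Function.comp, gA]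
    split_ifs <;> tauto
  · rw [if_neg hcp]
    have h0 : ∀ d ∈ pvOffs, gA board size i j d = 0 := by
      intro d _; simp only [gA]; split_ifs with h
      · exact absurd h.2.2 hcp
      · rfl
    rw [List.map_congr_left h0]
    simp

theorem pvAEq (board : List (List Int)) (size : Int) :
    num_potential_connection_spot board size
      = ((PySem.List.pyRange 0 size 1).map fun i =>
          ((PySem.List.pyRange 0 size 1).map fun j =>
            (pvOffs.map (gA board size i j)).sum).sum).sum := by
  unfold num_potential_connection_spot
  simp only [pvFoldlIfAdd, PySem.List.foldl_add, zero_add]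
  simp only [pvACell]

theorem pvBCell (board : List (List Int)) (size i j : Int) (s : Int) :
    (pvFwd.foldl (fun score d =>
        let ni := i + d.1
        let nj := j + d.2
        if 0 ≤ ni ∧ ni < size ∧ 0 ≤ nj ∧ nj < size then
          let b := pvCell board ni nj
          if b = 0 then (if pvCell board i j ≠ 0 then score + pvCell board i j else score)
          else (if pvCell board i j = 0 then score + b else score)
        else score) s)
      = s + (pvFwd.map (gE board size i j)).sum := by
  refine pvFoldlAddF (gE board size i j) _ ?_ pvFwd s
  intro t d
  simp only [gE]
  split_ifs <;> omega

theorem pvBEq (board : List (List Int)) (size : Int) :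
    num_potential_connection_spot_alt board size
      = ((PySem.List.pyRange 0 size 1).map fun i =>
          ((PySem.List.pyRange 0 size 1).map fun j =>
            (pvFwd.map (gE board size i j)).sum).sum).sum := by
  unfold num_potential_connection_spot_alt
  simp only [pvBCell, PySem.List.foldl_add, zero_add]

theorem pvSumPyRange (size : Int) (f : Int → Int) :
    ((PySem.List.pyRange 0 size 1).map f).sum = ∑ i ∈ Finset.Ico (0 : Int) size, f i := by
  have hnd := PySem.List.nodup_pyRange_one (a := 0) (b := size)
  have h1 : (PySem.List.pyRange 0 size 1).toFinset = Finset.Ico (0 : Int) size := by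
    ext x; simp [PySem.List.mem_pyRange_one]
  rw [← h1, List.sum_toFinset _ hnd]

theorem pvSumOffs (g : Int × Int → Int) :
    (pvOffs.map g).sum = ∑ k ∈ Finset.Ico (0 : Int) 6, g (offIdx k) := by
  have h : (Finset.Ico (0 : Int) 6) = ({0, 1, 2, 3, 4, 5} : Finset Int) := by decide
  rw [h]
  simp [pvOffs, offIdx]

theorem pvSumFwd (g : Int × Int → Int) :
    (pvFwd.map g).sum = ∑ k ∈ Finset.Ico (3 : Int) 6, g (offIdx k) := by
  have h : (Finset.Ico (3 : Int) 6) = ({3, 4, 5} : Finset Int) := by decide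
  rw [h]
  simp [pvFwd, offIdx, pvOffs, List.getD]

theorem pvOffNeg (k : Int) (h0 : 0 ≤ k) (h6 : k < 6) :
    offIdx (5 - k) = (-(offIdx k).1, -(offIdx k).2) := by
  interval_cases k <;> decide

-- the reversed halves of the forward-edge terms are exactly A's backward-offset terms
theorem pvShift (board : List (List Int)) (size : Int) :
    (∑ i ∈ Finset.Ico (0 : Int) size, ∑ j ∈ Finset.Ico (0 : Int) size,
      ∑ k ∈ Finset.Ico (3 : Int) 6, gRev board size i j (offIdx k))
      = ∑ i ∈ Finset.Ico (0 : Int) size, ∑ j ∈ Finset.Ico (0 : Int) size,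
          ∑ k ∈ Finset.Ico (0 : Int) 3, gA board size i j (offIdx k) := by
  have pack : ∀ (lo hi : Int) (g : Int → Int → (Int × Int) → Int),
      (∑ i ∈ Finset.Ico (0 : Int) size, ∑ j ∈ Finset.Ico (0 : Int) size,
        ∑ k ∈ Finset.Ico lo hi, g i j (offIdx k))
        = ∑ x ∈ (Finset.Ico (0 : Int) size ×ˢ (Finset.Ico (0 : Int) size ×ˢ Finset.Ico lo hi)),
            g x.1 x.2.1 (offIdx x.2.2) := by
    intro lo hi g; simp only [Finset.sum_product]
  rw [pack, pack]
  have hR0 : ∀ x ∈ Finset.Ico (0 : Int) size ×ˢ (Finset.Ico (0 : Int) size ×ˢ Finset.Ico (3 : Int) 6),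
      gRev board size x.1 x.2.1 (offIdx x.2.2) ≠ 0 →
        (0 ≤ x.1 + (offIdx x.2.2).1 ∧ x.1 + (offIdx x.2.2).1 < size ∧
         0 ≤ x.2.1 + (offIdx x.2.2).2 ∧ x.2.1 + (offIdx x.2.2).2 < size) := by
    intro x _ hx
    simp only [gRev] at hx
    split_ifs at hx with h
    · exact h.1
    · exact absurd rfl hx
  have hA0 : ∀ x ∈ Finset.Ico (0 : Int) size ×ˢ (Finset.Ico (0 : Int) size ×ˢ Finset.Ico (0 : Int) 3),
      gA board size x.1 x.2.1 (offIdx x.2.2) ≠ 0 →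
        (0 ≤ x.1 + (offIdx x.2.2).1 ∧ x.1 + (offIdx x.2.2).1 < size ∧
         0 ≤ x.2.1 + (offIdx x.2.2).2 ∧ x.2.1 + (offIdx x.2.2).2 < size) := by
    intro x _ hx
    simp only [gA] at hx
    split_ifs at hx with h
    · exact (pvCheckPosIff _ _).mp h.1
    · exact absurd rfl hx
  rw [← Finset.sum_filter_of_ne hR0, ← Finset.sum_filter_of_ne hA0]
  refine Finset.sum_nbij'
    (i := fun x : Int × Int × Int =>
      (x.1 + (offIdx x.2.2).1, x.2.1 + (offIdx x.2.2).2, 5 - x.2.2))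
    (j := fun x : Int × Int × Int =>
      (x.1 + (offIdx x.2.2).1, x.2.1 + (offIdx x.2.2).2, 5 - x.2.2))
    ?_ ?_ ?_ ?_ ?_
  · intro x hx
    simp only [Finset.mem_filter, Finset.mem_product, Finset.mem_Ico] at hx ⊢
    obtain ⟨⟨⟨hi0, hi1⟩, ⟨hj0, hj1⟩, hk0, hk1⟩, hP⟩ := hx
    have hneg := pvOffNeg x.2.2 (by omega) (by omega)
    constructor
    · exact ⟨⟨hP.1, hP.2.1⟩, ⟨hP.2.2.1, hP.2.2.2⟩, by omega, by omega⟩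
    · rw [hneg]; constructor; omega; constructor; omega; constructor; omega; omega
  · intro x hx
    simp only [Finset.mem_filter, Finset.mem_product, Finset.mem_Ico] at hx ⊢
    obtain ⟨⟨⟨hi0, hi1⟩, ⟨hj0, hj1⟩, hk0, hk1⟩, hP⟩ := hx
    have hneg := pvOffNeg x.2.2 (by omega) (by omega)
    constructor
    · exact ⟨⟨hP.1, hP.2.1⟩, ⟨hP.2.2.1, hP.2.2.2⟩, by omega, by omega⟩
    · rw [hneg]; constructor; omega; constructor; omega; constructor; omega; omega
  · intro x hx
    simp only [Finset.mem_filter, Finset.mem_product, Finset.mem_Ico] at hx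
    obtain ⟨⟨⟨hi0, hi1⟩, ⟨hj0, hj1⟩, hk0, hk1⟩, hP⟩ := hx
    have h55 : (5 : Int) - (5 - x.2.2) = x.2.2 := by ring
    have hneg := pvOffNeg x.2.2 (by omega) (by omega)
    ext <;> simp only [h55, hneg] <;> ring
  · intro x hx
    simp only [Finset.mem_filter, Finset.mem_product, Finset.mem_Ico] at hx
    obtain ⟨⟨⟨hi0, hi1⟩, ⟨hj0, hj1⟩, hk0, hk1⟩, hP⟩ := hx
    have h55 : (5 : Int) - (5 - x.2.2) = x.2.2 := by ring
    have hneg := pvOffNeg x.2.2 (by omega) (by omega)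
    ext <;> simp only [h55, hneg] <;> ring
  · intro x hx
    simp only [Finset.mem_filter, Finset.mem_product, Finset.mem_Ico] at hx
    obtain ⟨⟨⟨hi0, hi1⟩, ⟨hj0, hj1⟩, hk0, hk1⟩, hP⟩ := hx
    have h55 : (5 : Int) - (5 - x.2.2) = x.2.2 := by ring
    have hneg := pvOffNeg x.2.2 (by omega) (by omega)
    have e1 : x.1 + (offIdx x.2.2).1 + (offIdx (5 - x.2.2)).1 = x.1 := by rw [hneg]; ring
    have e2 : x.2.1 + (offIdx x.2.2).2 + (offIdx (5 - x.2.2)).2 = x.2.1 := by rw [hneg]; ring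
    have hcp1 : check_pos (x.1, x.2.1) size = true := by
      rw [pvCheckPosIff]; exact ⟨hi0, hi1, hj0, hj1⟩
    simp only [gA, gRev, e1, e2, hcp1]
    split_ifs with h1 h2 h2 <;> first | rfl | (exfalso; tauto)

-- ===== VERDICT (by name: the statement is the Claim_ definition above) =====
theorem num_potential_connection_spot_spec : Claim_equal_num_potential_connection_spot := by
  intro board size _ _
  unfold Spec_num_potential_connection_spot
  rw [pvAEq, pvBEq]
  simp only [pvSumOffs, pvSumFwd, pvSumPyRange]
  have hsplit : ∀ i j : Int,
      (∑ k ∈ Finset.Ico (0 : Int) 6, gA board size i j (offIdx k))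
        = (∑ k ∈ Finset.Ico (0 : Int) 3, gA board size i j (offIdx k))
          + ∑ k ∈ Finset.Ico (3 : Int) 6, gA board size i j (offIdx k) := by
    intro i j
    have hu : Finset.Ico (0:Int) 6 = Finset.Ico (0:Int) 3 ∪ Finset.Ico (3:Int) 6 := by decide
    have hd : Disjoint (Finset.Ico (0:Int) 3) (Finset.Ico (3:Int) 6) := by decide
    rw [hu, Finset.sum_union hd]
  have hE : ∀ i j : Int,
      (∑ k ∈ Finset.Ico (3 : Int) 6, gE board size i j (offIdx k))
        = (∑ k ∈ Finset.Ico (3 : Int) 6, gA board size i j (offIdx k))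
          + ∑ k ∈ Finset.Ico (3 : Int) 6, gRev board size i j (offIdx k) := by
    intro i j
    rw [← Finset.sum_add_distrib]
    exact Finset.sum_congr rfl (fun k _ => pvEdgeSplit board size i j (offIdx k))
  simp only [hsplit, hE, Finset.sum_add_distrib, pvShift]
  ring
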